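-- pv_equiv track=rewrite | github.com/paiml/depyler | examples/hard_error_patterns.py | converge_to_zero
-- ===== SOURCE A (Python) =====
-- def converge_to_zero(value: int, max_iters: int) -> int:
--     """Halve value toward zero. Return iterations or -1."""
--     current: int = value
--     if current < 0:
--         current = -current
--     iters: int = 0
--     while iters < max_iters:
--         if current == 0:
--             return iters
--         current = current // 2
--         iters = iters + 1
--     if current == 0:
--         return iters
--     return -1
-- ===== SOURCE B (Python) =====
-- def converge_to_zero(value: int, max_iters: int) -> int:
--     """Halve value toward zero. Return iterations or -1."""
--     if value == 0:
--         return 0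
--     need = abs(value).bit_length()
--     return need if need <= max_iters else -1
-- ===== Notes on version B (the rewrite author's own statement) =====
-- stated objective: simpler
-- what changed: Replaced the halving while-loop with a closed-form bit_length computation: the number of halvings of |value| to reach 0 is exactly abs(value).bit_length(), compared once against max_iters.
import Mathlib
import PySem

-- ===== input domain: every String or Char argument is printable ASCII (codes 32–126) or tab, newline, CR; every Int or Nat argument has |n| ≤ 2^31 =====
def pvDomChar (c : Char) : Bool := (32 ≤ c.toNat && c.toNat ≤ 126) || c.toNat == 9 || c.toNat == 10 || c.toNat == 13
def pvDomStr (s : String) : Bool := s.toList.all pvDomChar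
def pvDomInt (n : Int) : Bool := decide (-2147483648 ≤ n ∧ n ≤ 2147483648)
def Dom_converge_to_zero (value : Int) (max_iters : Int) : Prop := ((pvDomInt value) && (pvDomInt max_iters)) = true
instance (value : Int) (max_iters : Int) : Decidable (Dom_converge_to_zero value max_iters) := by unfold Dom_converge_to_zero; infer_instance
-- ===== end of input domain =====

-- B replaces A's halving while-loop by a closed-form bit-length comparison (simpler).

-- ===== PORT A =====
-- the while-loop of A: state (current, iters), runs while iters < max_iters
def convLoop (current : Int) (iters : Int) (max_iters : Int) : Int :=
  if iters < max_iters then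
    if current = 0 then iters
    else convLoop (PySem.Int.floordiv current 2) (iters + 1) max_iters
  else
    if current = 0 then iters else -1
termination_by (max_iters - iters).toNat
decreasing_by omega

def converge_to_zero (value : Int) (max_iters : Int) : Int :=
  convLoop (if value < 0 then -value else value) 0 max_iters

-- ===== PORT B =====
def converge_to_zero_alt (value : Int) (max_iters : Int) : Int :=
  if value = 0 then 0
  else
    let need : Int := PySem.Int.bitLength |value|   -- abs(value).bit_length()
    if need ≤ max_iters then need else -1

-- ===== PRECONDITION & SPEC =====
def Spec_converge_to_zero (value : Int) (max_iters : Int) (out : Int) : Prop := out = converge_to_zero_alt value max_iters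
instance (value : Int) (max_iters : Int) (out : Int) : Decidable (Spec_converge_to_zero value max_iters out) := by unfold Spec_converge_to_zero; infer_instance

-- ===== CLAIM (what is proved, stated in full; the proofs are below) =====
def Claim_equal_converge_to_zero : Prop := ∀ (value : Int) (max_iters : Int), Dom_converge_to_zero value max_iters → Spec_converge_to_zero value max_iters (converge_to_zero value max_iters)

-- ===== LEMMAS AND PROOFS =====

theorem bitLength_ne_zero (c : Int) (h : 0 < c) : PySem.Int.bitLength c ≠ 0 := by
  rw [PySem.Int.bitLength_of_pos h]; omega

-- loop characterisation: for nonnegative current, the loop returns iters when current is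
-- already 0, else iters + bit_length(current) when that reaches max_iters in time, else -1
theorem convLoop_eq (fuel : Nat) (current iters max_iters : Int)
    (hc : 0 ≤ current) (hf : (max_iters - iters).toNat ≤ fuel) :
    convLoop current iters max_iters =
      if current = 0 then iters
      else if iters + (PySem.Int.bitLength current : Int) ≤ max_iters
        then iters + (PySem.Int.bitLength current : Int) else -1 := by
  induction fuel generalizing current iters with
  | zero =>
    rw [convLoop]
    have hlt : ¬ iters < max_iters := by omega
    simp only [hlt, if_false]
    by_cases h0 : current = 0
    · simp [h0]
    · have hb := bitLength_ne_zero current (by omega)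
      have : ¬ iters + (PySem.Int.bitLength current : Int) ≤ max_iters := by omega
      simp [h0, this]
  | succ k ih =>
    rw [convLoop]
    by_cases h0 : current = 0
    · simp [h0]
    · simp only [h0, if_false]
      by_cases hlt : iters < max_iters
      · simp only [hlt, if_true]
        have hfd : PySem.Int.floordiv current 2 = current / 2 :=
          PySem.Int.floordiv_eq_ediv_of_pos (by omega)
        have hbl : PySem.Int.bitLength current = PySem.Int.bitLength (current / 2) + 1 := by
          rw [PySem.Int.bitLength_of_pos (by omega), hfd]
        rw [hfd, ih (current / 2) (iters + 1) (by omega) (by omega), hbl]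
        by_cases h2 : current / 2 = 0
        · simp only [h2, if_true, PySem.Int.bitLength_zero]
          push_cast
          split_ifs with hle <;> omega
        · simp only [h2, if_false]
          push_cast
          split_ifs with h3 h4 h4 <;> omega
      · simp only [hlt, if_false]
        have hb := bitLength_ne_zero current (by omega)
        have : ¬ iters + (PySem.Int.bitLength current : Int) ≤ max_iters := by omega
        simp [this]

-- ===== VERDICT (by name: the statement is the Claim_ definition above) =====
theorem converge_to_zero_spec : Claim_equal_converge_to_zero := by
  intro value max_iters _
  unfold Spec_converge_to_zero converge_to_zero converge_to_zero_alt
  set c : Int := if value < 0 then -value else value with hc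
  have hc0 : 0 ≤ c := by rw [hc]; split_ifs <;> omega
  have hca : c = |value| := by rw [hc]; split_ifs <;> [rw [abs_of_neg (by omega)]; rw [abs_of_nonneg (by omega)]]
  rw [convLoop_eq (max_iters - 0).toNat c 0 max_iters hc0 (le_refl _), hca]
  by_cases h0 : value = 0
  · simp [h0]
  · have : ¬ |value| = 0 := by simp [h0]
    simp only [this, if_false, h0, if_false, zero_add]
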